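-- pv_equiv track=rewrite | github.com/6jwj6/dpjoin | utils.py | preprocess_table_data
-- ===== SOURCE A (Python) =====
-- def preprocess_table_data(records, join_key_name):
--     """
--     将包含完整属性的字典列表，按指定的 Join Key 转化为 DP 算法需要的格式。
--     输出: [(key, freq, list_of_payloads), ...]
--     """
--     from collections import defaultdict
--     data_map = defaultdict(list)
--     for row in records:
--         k = row[join_key_name]
--         data_map[k].append(row)
--
--     sorted_data = [(k, len(p_list), p_list) for k, p_list in sorted(data_map.items(), key=lambda x: x[0])]
--     return sorted_data
-- ===== SOURCE B (Python) =====
-- def preprocess_table_data(records, join_key_name):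
--     keys = sorted(set(row[join_key_name] for row in records))
--     result = []
--     for k in keys:
--         group = [row for row in records if row[join_key_name] == k]
--         result.append((k, len(group), group))
--     return result
-- ===== Notes on version B (the rewrite author's own statement) =====
-- stated objective: alternative
-- what changed: Replaces the defaultdict grouping pass followed by an item sort with sorting the distinct join-key values once and building each group by filtering the records per key; no dictionary is maintained.
import Mathlib
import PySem

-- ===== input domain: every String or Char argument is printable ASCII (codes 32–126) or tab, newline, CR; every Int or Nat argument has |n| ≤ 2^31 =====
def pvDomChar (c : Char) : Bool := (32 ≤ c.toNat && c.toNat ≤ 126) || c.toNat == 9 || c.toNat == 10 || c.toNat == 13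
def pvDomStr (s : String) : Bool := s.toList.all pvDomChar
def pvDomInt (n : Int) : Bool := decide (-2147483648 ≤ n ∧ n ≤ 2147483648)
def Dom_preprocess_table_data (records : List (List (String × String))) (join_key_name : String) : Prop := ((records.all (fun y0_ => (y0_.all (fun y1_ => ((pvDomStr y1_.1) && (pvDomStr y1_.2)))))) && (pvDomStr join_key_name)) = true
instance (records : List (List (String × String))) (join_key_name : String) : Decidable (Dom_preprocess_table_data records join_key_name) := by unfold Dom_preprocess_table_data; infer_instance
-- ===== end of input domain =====

-- B replaces A's defaultdict grouping + item sort with sorted distinct keys + a per-key filter over the records (alternative algorithm, same return values).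


-- ===== PORT A =====
-- row[join_key_name] (dict lookup; KeyError excluded by Pre_) as the total getD form, exact under Pre_
def pvRowKey (row : List (String × String)) (join_key_name : String) : String :=
  (PySem.Dict.mk row).getD join_key_name ""

def preprocess_table_data (records : List (List (String × String))) (join_key_name : String) : List (String × Int × (List (List (String × String)))) :=
  let data_map : PySem.Dict String (List (List (String × String))) :=
    records.foldl (fun d row => d.modify (pvRowKey row join_key_name) [] (· ++ [row])) PySem.Dict.empty
  (PySem.List.sorted data_map.items (fun x => x.1) false).map
    (fun kp => (kp.1, (kp.2.length : Int), kp.2))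

-- ===== PORT B =====
def preprocess_table_data_alt (records : List (List (String × String))) (join_key_name : String) : List (String × Int × (List (List (String × String)))) :=
  let keys := PySem.List.sorted (PySem.Set.ofList (records.map (fun row => pvRowKey row join_key_name))) (fun x => x) false
  keys.map (fun k =>
    let group := records.filter (fun row => pvRowKey row join_key_name == k)
    (k, (group.length : Int), group))

-- ===== PRECONDITION & SPEC =====
-- Pre_ excludes exactly the inputs where some record lacks the join key, on which Python A raises KeyError.
def Pre_preprocess_table_data (records : List (List (String × String))) (join_key_name : String) : Prop :=
  ∀ row ∈ records, join_key_name ∈ row.map (·.1)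
instance (records : List (List (String × String))) (join_key_name : String) : Decidable (Pre_preprocess_table_data records join_key_name) := by unfold Pre_preprocess_table_data; infer_instance

def pvWitness_preprocess_table_data : (List (List (String × String))) × String :=
  ([[("id", "1"), ("v", "x")], [("id", "2"), ("v", "y")]], "id")

def Spec_preprocess_table_data (records : List (List (String × String))) (join_key_name : String) (out : List (String × Int × (List (List (String × String))))) : Prop := out = preprocess_table_data_alt records join_key_name
instance (records : List (List (String × String))) (join_key_name : String) (out : List (String × Int × (List (List (String × String))))) : Decidable (Spec_preprocess_table_data records join_key_name out) := by unfold Spec_preprocess_table_data; infer_instance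

-- ===== CLAIM (what is proved, stated in full; the proofs are below) =====
def Claim_equal_preprocess_table_data : Prop := ∀ (records : List (List (String × String))) (join_key_name : String), Dom_preprocess_table_data records join_key_name → Pre_preprocess_table_data records join_key_name → Spec_preprocess_table_data records join_key_name (preprocess_table_data records join_key_name)

-- ===== LEMMAS AND PROOFS =====

-- the grouping dict built by A's loop: its getD at any key is B's filter of the records
theorem pv_groupmap_getD (records : List (List (String × String))) (jk : String) (c : String) :
    (records.foldl (fun d row => d.modify (pvRowKey row jk) [] (· ++ [row]))
      (PySem.Dict.empty : PySem.Dict String (List (List (String × String))))).getD c []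
    = records.filter (fun row => pvRowKey row jk == c) := by
  have h1 : records.foldl (fun d row => d.modify (pvRowKey row jk) [] (· ++ [row]))
      (PySem.Dict.empty : PySem.Dict String (List (List (String × String))))
    = (records.map (fun r => (pvRowKey r jk, r))).foldl
        (fun d p => d.modify p.1 [] (· ++ [p.2])) PySem.Dict.empty := by
    rw [List.foldl_map]
  rw [h1, PySem.Dict.getD_foldl_modify_append, PySem.Dict.getD_empty, List.nil_append,
    List.filter_map]
  simp [Function.comp_def]

theorem pv_equal (records : List (List (String × String))) (jk : String) :
    preprocess_table_data records jk = preprocess_table_data_alt records jk := by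
  unfold preprocess_table_data preprocess_table_data_alt
  dsimp only
  set d := records.foldl (fun d row => d.modify (pvRowKey row jk) [] (· ++ [row]))
      (PySem.Dict.empty : PySem.Dict String (List (List (String × String)))) with hd
  have hnd : d.keys.Nodup := by
    rw [hd]
    exact PySem.Dict.nodup_keys_foldl_modify_key records (fun r => pvRowKey r jk) []
      (fun d r => (· ++ [r])) PySem.Dict.empty (by simp [PySem.Dict.keys_empty])
  have hkeys : d.keys = PySem.Set.ofList (records.map (fun r => pvRowKey r jk)) := by
    rw [hd, PySem.Dict.keys_foldl_modify_key]
    simp [PySem.Dict.keys_empty, PySem.Set.update, PySem.Set.ofList]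
  have hitems : d.items = d.keys.map (fun k => (k, d.getD k [])) :=
    PySem.Dict.items_eq_map_keys d hnd []
  set ks := PySem.List.sorted (PySem.Set.ofList (records.map (fun r => pvRowKey r jk)))
      (fun x => x) false with hks
  have hgrp : ∀ c, d.getD c [] = records.filter (fun row => pvRowKey row jk == c) := by
    intro c; rw [hd]; exact pv_groupmap_getD records jk c
  -- the sorted items list of d is exactly ks paired with the groups
  have hsorted : PySem.List.sorted d.items (fun x => x.1) false
      = ks.map (fun k => (k, d.getD k [])) := by
    apply PySem.List.sorted_eq_of_perm_of_pairwise_lt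
    · rw [hitems, hkeys]
      exact List.Perm.map _ (PySem.List.sorted_perm _ _ _)
    · have hp : ks.Pairwise (· < ·) := by
        rw [hks]; exact PySem.List.sorted_ofList_pairwise_lt _
      exact List.Pairwise.map _ (by intro a b hab; simpa using hab) hp
  rw [hsorted, List.map_map]
  refine List.map_congr_left ?_
  intro k _
  simp [hgrp k]

-- ===== VERDICT (by name: the statement is the Claim_ definition above) =====
theorem preprocess_table_data_spec : Claim_equal_preprocess_table_data := by
  intro records jk _ _
  unfold Spec_preprocess_table_data
  exact pv_equal records jk
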